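-- pv_equiv track=rewrite | github.com/jelearn/zip-extractor | src/zip_extract/cli.py | match_entries
-- ===== SOURCE A (Python) =====
-- def match_entries(all_names: list[str], patterns: list[str]) -> list[str]:
--     """Return zip names that match any of the given prefix patterns."""
--     matched: list[str] = []
--     seen: set[str] = set()
--     for pat in patterns:
--         pat_clean = pat.rstrip("/")
--         for name in all_names:
--             if name == pat_clean or name.startswith(pat_clean + "/"):
--                 if name not in seen:
--                     matched.append(name)
--                     seen.add(name)
--     return matched
-- ===== SOURCE B (Python) =====
-- def _path_prefixes(name):
--     """name itself plus every prefix of name that ends just before a '/'."""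
--     pres = [name]
--     for i in range(len(name)):
--         if name[i] == "/":
--             pres.append(name[:i])
--     return pres
--
--
-- def match_entries(all_names, patterns):
--     """Return zip names that match any of the given prefix patterns."""
--     index = {}
--     for name in all_names:
--         for q in _path_prefixes(name):
--             index.setdefault(q, []).append(name)
--     matched = []
--     seen = set()
--     for pat in patterns:
--         for name in index.get(pat.rstrip("/"), []):
--             if name not in seen:
--                 matched.append(name)
--                 seen.add(name)
--     return matched
-- ===== Notes on version B (the rewrite author's own statement) =====
-- stated objective: faster
-- what changed: Instead of scanning all_names once per pattern with a string-prefix test, B builds a hash index once, mapping every path prefix of each name to the names under it, and answers each pattern by a single dict lookup.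
import Mathlib
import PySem

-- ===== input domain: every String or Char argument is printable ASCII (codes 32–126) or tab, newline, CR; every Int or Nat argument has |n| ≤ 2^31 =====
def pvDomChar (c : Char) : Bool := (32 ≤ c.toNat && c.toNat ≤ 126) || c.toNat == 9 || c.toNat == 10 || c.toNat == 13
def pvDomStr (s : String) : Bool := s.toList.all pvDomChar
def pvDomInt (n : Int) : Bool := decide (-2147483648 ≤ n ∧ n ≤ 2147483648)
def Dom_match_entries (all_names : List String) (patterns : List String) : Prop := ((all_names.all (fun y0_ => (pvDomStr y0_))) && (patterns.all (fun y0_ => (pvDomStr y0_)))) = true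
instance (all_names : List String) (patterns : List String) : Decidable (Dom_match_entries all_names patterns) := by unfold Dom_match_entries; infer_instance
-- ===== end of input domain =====

-- B replaces A's per-pattern scan of all_names by a hash index from every path prefix of each
-- name to the names under it, built once; per pattern a single lookup yields the hits in order.

-- ===== PORT A =====
-- pat.rstrip("/") ported by hand (PySem has no rstrip-with-chars): drop trailing '/' characters; exact.
def pvRstripSlash (s : String) : String :=
  String.ofList ((s.toList.reverse.dropWhile (fun c => c == '/')).reverse)

def match_entries (all_names : List String) (patterns : List String) : List String :=
  (patterns.foldl (fun (st : List String × PySem.Set String) pat =>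
      let patClean := pvRstripSlash pat
      all_names.foldl (fun st name =>
        if name == patClean || PySem.Str.startswith name (patClean ++ "/") then
          if PySem.Set.contains st.2 name then st
          else (st.1 ++ [name], PySem.Set.add st.2 name)
        else st) st)
    ([], PySem.Set.empty)).1

-- ===== PORT B =====
-- port of Source B's _path_prefixes: name itself plus name[:i] for every i with name[i] == '/'
def pvPathPrefixes (name : String) : List String :=
  (PySem.List.pyRange 0 (name.toList.length : Int)).foldl
    (fun pres i =>
      if PySem.List.pyGetD name.toList i ' ' == '/' then
        pres ++ [String.ofList (PySem.List.slice name.toList none (some i))]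
      else pres)
    [name]

def match_entries_alt (all_names : List String) (patterns : List String) : List String :=
  let index : PySem.Dict String (List String) :=
    all_names.foldl (fun d name =>
      (pvPathPrefixes name).foldl
        (fun d q => PySem.Dict.modify d q [] (fun xs => xs ++ [name])) d)
      PySem.Dict.empty
  (patterns.foldl (fun (st : List String × PySem.Set String) pat =>
      (PySem.Dict.getD index (pvRstripSlash pat) []).foldl
        (fun st name =>
          if PySem.Set.contains st.2 name then st
          else (st.1 ++ [name], PySem.Set.add st.2 name)) st)
    ([], PySem.Set.empty)).1

-- ===== PRECONDITION & SPEC =====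
def Spec_match_entries (all_names : List String) (patterns : List String) (out : List String) : Prop := out = match_entries_alt all_names patterns
instance (all_names : List String) (patterns : List String) (out : List String) : Decidable (Spec_match_entries all_names patterns out) := by unfold Spec_match_entries; infer_instance

-- ===== CLAIM (what is proved, stated in full; the proofs are below) =====
def Claim_equal_match_entries : Prop := ∀ (all_names : List String) (patterns : List String), Dom_match_entries all_names patterns → Spec_match_entries all_names patterns (match_entries all_names patterns)

-- ===== LEMMAS AND PROOFS =====

-- the prefix list, in closed form
theorem pvPathPrefixes_eq (name : String) :
    pvPathPrefixes name =
      name :: ((List.range name.toList.length).filter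
          (fun i => name.toList.getD i ' ' == '/')).map
        (fun i => String.ofList (name.toList.take i)) := by
  unfold pvPathPrefixes
  rw [PySem.List.pyRange_zero_natCast, List.foldl_map,
      show (fun (pres : List String) (k : Nat) =>
          if PySem.List.pyGetD name.toList (k : Int) ' ' == '/' then
            pres ++ [String.ofList (PySem.List.slice name.toList none (some (k : Int)))]
          else pres)
        = (fun pres k =>
            if (fun i => name.toList.getD i ' ' == '/') k then
              pres ++ [(fun i => String.ofList (name.toList.take i)) k] else pres) from ?_,
      PySem.List.foldl_append_if]
  · simp
  · funext pres k
    rw [PySem.List.pyGetD_natCast, PySem.List.slice_to name.toList (by positivity)]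
    simp

theorem mem_pvPathPrefixes (c name : String) :
    c ∈ pvPathPrefixes name ↔ (c = name ∨ (c.toList ++ ['/']) <+: name.toList) := by
  rw [pvPathPrefixes_eq]
  simp only [List.mem_cons, List.mem_map, List.mem_filter, List.mem_range]
  constructor
  · rintro (h | ⟨i, ⟨hi, hslash⟩, rfl⟩)
    · exact Or.inl h
    · right
      have htake : name.toList = name.toList.take i ++ name.toList.drop i := (List.take_append_drop i name.toList).symm
      have hdrop : name.toList.drop i = name.toList[i] :: name.toList.drop (i + 1) :=
        List.drop_eq_getElem_cons hi
      have hget : name.toList[i] = '/' := by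
        have := hslash
        simp only [List.getD, List.getElem?_eq_getElem hi] at this
        simpa using this
      refine ⟨name.toList.drop (i + 1), ?_⟩
      simp only [String.toList_ofList]
      rw [List.append_assoc]
      conv_rhs => rw [htake, hdrop, hget]
      simp
  · rintro (h | ⟨t, ht⟩)
    · exact Or.inl h
    · right
      have ht' : name.toList = c.toList ++ '/' :: t := by rw [← ht]; simp
      refine ⟨c.toList.length, ⟨?_, ?_⟩, ?_⟩
      · have hlen := congrArg List.length ht'
        simp only [List.length_append, List.length_cons] at hlen
        omega
      · have : name.toList.getD c.toList.length ' ' = '/' := by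
          rw [ht', List.getD, List.getElem?_append_right (le_refl _)]
          simp
        simpa using this
      · have : name.toList.take c.toList.length = c.toList := by
          rw [ht']; simp
        rw [this]; simp

theorem nodup_pvPathPrefixes (name : String) : (pvPathPrefixes name).Nodup := by
  rw [pvPathPrefixes_eq]
  refine List.Nodup.cons ?_ ?_
  · intro hmem
    obtain ⟨i, hi, heq⟩ := List.mem_map.mp hmem
    have hilt : i < name.toList.length := List.mem_range.mp (List.mem_filter.mp hi).1
    have hl : name.toList.length = name.length := by simp
    have := congrArg (fun s => s.toList.length) heq
    simp at this; omega
  · refine List.Nodup.map_on ?_ ((List.nodup_range).filter _)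
    intro i hi j hj heq
    have hilt : i < name.toList.length := List.mem_range.mp (List.mem_filter.mp hi).1
    have hjlt : j < name.toList.length := List.mem_range.mp (List.mem_filter.mp hj).1
    have hl : name.toList.length = name.length := by simp
    have := congrArg (fun s => s.toList.length) heq
    simp at this; omega

-- filtering a Nodup list for equality with c gives [c] or []
theorem filter_beq_of_nodup {α : Type} [DecidableEq α] (l : List α) (hnd : l.Nodup) (c : α) :
    l.filter (fun q => q == c) = if c ∈ l then [c] else [] := by
  induction l with
  | nil => simp
  | cons x t ih =>
    rcases List.nodup_cons.mp hnd with ⟨hx, hnt⟩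
    by_cases hxc : x = c
    · subst hxc
      simp [ih hnt, hx]
    · simp only [List.filter_cons]
      rw [ih hnt]
      by_cases hc : c ∈ t <;> simp [hxc, hc, Ne.symm hxc]

-- one name inserted into the index: its bucket for c grows by [name] iff c is one of its prefixes
theorem getD_index_step (d : PySem.Dict String (List String)) (n c : String) :
    ((pvPathPrefixes n).foldl
        (fun d q => PySem.Dict.modify d q [] (fun xs => xs ++ [n])) d).getD c []
      = d.getD c [] ++ (if c ∈ pvPathPrefixes n then [n] else []) := by
  have hmap : (pvPathPrefixes n).foldl
      (fun d q => PySem.Dict.modify d q [] (fun xs => xs ++ [n])) d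
      = ((pvPathPrefixes n).map (fun q => (q, n))).foldl
          (fun d p => PySem.Dict.modify d p.1 [] (fun xs => xs ++ [p.2])) d := by
    rw [List.foldl_map]
  rw [hmap, PySem.Dict.getD_foldl_modify_append]
  congr 1
  rw [List.filter_map]
  have : ((pvPathPrefixes n).filter ((fun p => p.1 == c) ∘ (fun q => (q, n))))
      = (pvPathPrefixes n).filter (fun q => q == c) := by rfl
  rw [this, filter_beq_of_nodup _ (nodup_pvPathPrefixes n) c]
  by_cases h : c ∈ pvPathPrefixes n <;> simp [h]

-- the whole index: bucket c holds, in order, exactly the names having c as a path prefix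
theorem getD_index (l : List String) (d : PySem.Dict String (List String)) (c : String) :
    (l.foldl (fun d name =>
        (pvPathPrefixes name).foldl
          (fun d q => PySem.Dict.modify d q [] (fun xs => xs ++ [name])) d) d).getD c []
      = d.getD c [] ++ l.filter (fun n => decide (c ∈ pvPathPrefixes n)) := by
  induction l generalizing d with
  | nil => simp
  | cons n t ih =>
    rw [List.foldl_cons, ih, getD_index_step, List.filter_cons]
    by_cases h : c ∈ pvPathPrefixes n <;> simp [h]

-- A's match test agrees with membership in the prefix list
theorem match_test_eq (c n : String) :
    (n == c || PySem.Str.startswith n (c ++ "/")) = decide (c ∈ pvPathPrefixes n) := by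
  rw [Bool.eq_iff_iff, Bool.or_eq_true, beq_iff_eq, decide_eq_true_iff, mem_pvPathPrefixes]
  rw [PySem.Str.startswith_eq, PySem.Chars.startswith_iff]
  constructor
  · rintro (h | h)
    · exact Or.inl h.symm
    · right; simpa using h
  · rintro (h | h)
    · exact Or.inl h.symm
    · right; simpa using h

-- ===== VERDICT (by name: the statement is the Claim_ definition above) =====
theorem match_entries_spec : Claim_equal_match_entries := by
  intro all_names patterns _
  show match_entries all_names patterns = match_entries_alt all_names patterns
  unfold match_entries match_entries_alt
  congr 1
  apply PySem.List.foldl_congr_mem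
  intro st pat _
  simp only
  rw [getD_index, PySem.Dict.getD_empty, List.nil_append,
      PySem.List.foldl_if_eq_foldl_filter
        (fun name => name == pvRstripSlash pat ||
          PySem.Str.startswith name (pvRstripSlash pat ++ "/"))
        (fun st name =>
          if PySem.Set.contains st.2 name then st
          else (st.1 ++ [name], PySem.Set.add st.2 name)) all_names st]
  congr 1
  apply List.filter_congr
  intro n _
  exact match_test_eq (pvRstripSlash pat) n
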